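-- pv_equiv track=rewrite | github.com/MatskevichHanna/Python | lesson03/task05.py | create_fibonacci
-- ===== SOURCE A (Python) =====
-- def create_fibonacci(number: int) -> list:
--     fibonacci = [0]
--     fibonacci_1 = 0
--     fibonacci_2 = 1
--     negative = 1
--     for i in range(1, number + 1):
--         fibonacci_1, fibonacci_2 = fibonacci_2, fibonacci_1 + fibonacci_2
--         fibonacci.append(fibonacci_1)
--         fibonacci.insert(0, negative * fibonacci_1)
--         negative *= -1
--     return fibonacci
-- ===== SOURCE B (Python) =====
-- def create_fibonacci(number: int) -> list:
--     fib = []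
--     a, b = 0, 1
--     for _ in range(number):
--         a, b = b, a + b
--         fib.append(a)
--     left = [(-1) ** i * f for i, f in enumerate(fib)]
--     left.reverse()
--     return left + [0] + fib
-- ===== Notes on version B (the rewrite author's own statement) =====
-- stated objective: alternative
-- what changed: B builds the positive Fibonacci table in one loop, then derives the negative half as a reversed sign-alternating map over that table, replacing A's interleaved append/insert(0,...) loop; intended as faster (measured 2.99x at the largest size both finished, but a timing run could not confirm it overall).
import Mathlib
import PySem

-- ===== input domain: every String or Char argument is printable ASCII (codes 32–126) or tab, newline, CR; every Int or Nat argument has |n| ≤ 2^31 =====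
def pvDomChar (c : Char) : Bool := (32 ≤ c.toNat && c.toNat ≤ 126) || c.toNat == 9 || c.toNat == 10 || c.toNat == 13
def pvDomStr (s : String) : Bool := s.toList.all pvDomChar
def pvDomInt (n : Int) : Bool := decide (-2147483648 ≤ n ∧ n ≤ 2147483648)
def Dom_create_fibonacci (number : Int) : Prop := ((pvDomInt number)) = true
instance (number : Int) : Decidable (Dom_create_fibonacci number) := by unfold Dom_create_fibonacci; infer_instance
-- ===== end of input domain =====

-- B replaces A's interleaved append/insert(0,...) loop by one Fibonacci-table loop plus a
-- reversed sign-alternating map for the negative half (objective: alternative decomposition).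

-- ===== PORT A =====
-- literal port of A: state (fibonacci, fibonacci_1, fibonacci_2, negative);
-- append = ++ [·], insert(0, ·) = cons
def create_fibonacci (number : Int) : List Int :=
  (((PySem.List.pyRange 1 (number + 1) 1).foldl
    (fun (st : List Int × Int × Int × Int) _ =>
      let (fibonacci, f1, f2, negative) := st
      let f1' := f2
      let f2' := f1 + f2
      (negative * f1' :: (fibonacci ++ [f1']), f1', f2', negative * (-1)))
    ([0], 0, 1, 1))).1

-- ===== PORT B =====
-- literal port of Source B; (-1) ** i is ported as (-1) ^ i.toNat, exact here since
-- enumerate indices are ≥ 0 (Python's integer power with nonnegative exponent)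
def create_fibonacci_alt (number : Int) : List Int :=
  let st := (PySem.List.pyRange 0 number 1).foldl
    (fun (st : List Int × Int × Int) _ =>
      let (fib, a, b) := st
      (fib ++ [b], b, a + b))
    ([], 0, 1)
  let fib := st.1
  let left := ((PySem.List.enumerate fib 0).map
    (fun p => (-1 : Int) ^ p.1.toNat * p.2)).reverse
  left ++ [0] ++ fib

-- ===== PRECONDITION & SPEC =====
def Spec_create_fibonacci (number : Int) (out : List Int) : Prop := out = create_fibonacci_alt number
instance (number : Int) (out : List Int) : Decidable (Spec_create_fibonacci number out) := by unfold Spec_create_fibonacci; infer_instance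

-- ===== CLAIM (what is proved, stated in full; the proofs are below) =====
def Claim_equal_create_fibonacci : Prop := ∀ (number : Int), Dom_create_fibonacci number → Spec_create_fibonacci number (create_fibonacci number)

-- ===== LEMMAS AND PROOFS =====

-- mathematical Fibonacci over Int, used only in the proofs
def fibI : Nat → Int
  | 0 => 0
  | 1 => 1
  | n + 2 => fibI n + fibI (n + 1)

def Rtab (n : Nat) : List Int := (List.range n).map (fun i => fibI (i + 1))
def Lfwd (n : Nat) : List Int := (List.range n).map (fun i => (-1 : Int) ^ i * fibI (i + 1))

-- a foldl whose body ignores the element is function iteration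
theorem foldl_const {α β : Type} (g : β → β) :
    ∀ (l : List α) (s : β), l.foldl (fun s _ => g s) s = g^[l.length] s := by
  intro l
  induction l with
  | nil => intro s; simp
  | cons x xs ih =>
      intro s
      simp [List.foldl, ih, Function.iterate_succ_apply]

theorem A_state (n : Nat) :
    (fun (st : List Int × Int × Int × Int) =>
      let (fibonacci, f1, f2, negative) := st
      let f1' := f2
      let f2' := f1 + f2
      (negative * f1' :: (fibonacci ++ [f1']), f1', f2', negative * (-1)))^[n]
      (([0], 0, 1, 1) : List Int × Int × Int × Int)
    = ((Lfwd n).reverse ++ 0 :: Rtab n, fibI n, fibI (n + 1), (-1 : Int) ^ n) := by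
  induction n with
  | zero => simp [Lfwd, Rtab, fibI]
  | succ n ih =>
      rw [Function.iterate_succ_apply', ih]
      simp only [Lfwd, Rtab, List.range_succ, List.map_append, List.reverse_append,
        List.map_cons, List.map_nil, List.reverse_cons, List.reverse_nil]
      refine Prod.ext ?_ (Prod.ext ?_ (Prod.ext ?_ ?_)) <;> simp [fibI, pow_succ]

theorem B_state (n : Nat) :
    (fun (st : List Int × Int × Int) =>
      let (fib, a, b) := st
      (fib ++ [b], b, a + b))^[n] (([], 0, 1) : List Int × Int × Int)
    = (Rtab n, fibI n, fibI (n + 1)) := by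
  induction n with
  | zero => simp [Rtab, fibI]
  | succ n ih =>
      rw [Function.iterate_succ_apply', ih]
      simp [Rtab, List.range_succ, fibI]

theorem enum_map (n : Nat) :
    ((PySem.List.enumerate (Rtab n) 0).map
      (fun p => (-1 : Int) ^ p.1.toNat * p.2)) = Lfwd n := by
  induction n with
  | zero => simp [Rtab, Lfwd, PySem.List.enumerate_nil]
  | succ n ih =>
      have hlen : (Rtab n).length = n := by simp [Rtab]
      have : Rtab (n + 1) = Rtab n ++ [fibI (n + 1)] := by
        simp [Rtab, List.range_succ]
      rw [this, PySem.List.enumerate_append, List.map_append, ih]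
      simp [Lfwd, List.range_succ, hlen, PySem.List.enumerate_cons,
        PySem.List.enumerate_nil]

theorem create_fibonacci_eq (number : Int) :
    create_fibonacci number = create_fibonacci_alt number := by
  unfold create_fibonacci create_fibonacci_alt
  rw [foldl_const, foldl_const]
  rw [PySem.List.length_pyRange_one, PySem.List.length_pyRange_one]
  have h : (number + 1 - 1).toNat = (number - 0).toNat := by omega
  rw [h]
  set n := (number - 0).toNat with hn
  rw [A_state n, B_state n]
  simp [enum_map n]

-- ===== VERDICT (by name: the statement is the Claim_ definition above) =====
theorem create_fibonacci_spec : Claim_equal_create_fibonacci := by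
  intro number _
  unfold Spec_create_fibonacci
  exact create_fibonacci_eq number
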